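-- pv_equiv track=rewrite | github.com/ViperJuice/Code-Index-MCP | scripts/private_alpha_evidence.py | _validate_fixture_categories
-- ===== SOURCE A (Python) =====
-- from typing import Any
--
-- REQUIRED_FIXTURE_CATEGORIES = (
--     "python_repo",
--     "typescript_js_repo",
--     "mixed_docs_code_repo",
--     "multi_repo_workspace",
--     "large_ignored_vendor_repo",
-- )
--
-- def _validate_fixture_categories(fixtures: list[dict[str, Any]]) -> list[str]:
--     categories = [str(fixture.get("category", "")) for fixture in fixtures]
--     expected = set(REQUIRED_FIXTURE_CATEGORIES)
--     actual = set(categories)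
--     errors: list[str] = []
--     if actual != expected:
--         errors.append(
--             f"fixture categories must be exactly {sorted(expected)}; got {sorted(actual)}"
--         )
--     duplicates = sorted(category for category in actual if categories.count(category) > 1)
--     if duplicates:
--         errors.append(f"duplicate fixture categories: {duplicates}")
--     return errors
-- ===== SOURCE B (Python) =====
-- from typing import Any
--
-- REQUIRED_FIXTURE_CATEGORIES = (
--     "python_repo",
--     "typescript_js_repo",
--     "mixed_docs_code_repo",
--     "multi_repo_workspace",
--     "large_ignored_vendor_repo",
-- )
--
-- def _validate_fixture_categories(fixtures: list[dict[str, Any]]) -> list[str]: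
--     categories = [str(fixture.get("category", "")) for fixture in fixtures]
--     actual = set(categories)
--     errors: list[str] = []
--     if actual != set(REQUIRED_FIXTURE_CATEGORIES):
--         errors.append(
--             f"fixture categories must be exactly {sorted(set(REQUIRED_FIXTURE_CATEGORIES))}; got {sorted(actual)}"
--         )
--     # sort once, then scan adjacent equal runs: a run longer than 1 is a duplicate
--     ordered = sorted(categories)
--     duplicates: list[str] = []
--     i = 0
--     n = len(ordered)
--     while i < n:
--         j = i + 1
--         while j < n and ordered[j] == ordered[i]:
--             j += 1
--         if j - i > 1:
--             duplicates.append(ordered[i])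
--         i = j
--     if duplicates:
--         errors.append(f"duplicate fixture categories: {duplicates}")
--     return errors
-- ===== Notes on version B (the rewrite author's own statement) =====
-- stated objective: alternative
-- what changed: duplicates are found by sorting the category list once and scanning adjacent equal runs, instead of calling categories.count() (a full scan) for every distinct category; the set-equality check and messages are unchanged
import Mathlib
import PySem

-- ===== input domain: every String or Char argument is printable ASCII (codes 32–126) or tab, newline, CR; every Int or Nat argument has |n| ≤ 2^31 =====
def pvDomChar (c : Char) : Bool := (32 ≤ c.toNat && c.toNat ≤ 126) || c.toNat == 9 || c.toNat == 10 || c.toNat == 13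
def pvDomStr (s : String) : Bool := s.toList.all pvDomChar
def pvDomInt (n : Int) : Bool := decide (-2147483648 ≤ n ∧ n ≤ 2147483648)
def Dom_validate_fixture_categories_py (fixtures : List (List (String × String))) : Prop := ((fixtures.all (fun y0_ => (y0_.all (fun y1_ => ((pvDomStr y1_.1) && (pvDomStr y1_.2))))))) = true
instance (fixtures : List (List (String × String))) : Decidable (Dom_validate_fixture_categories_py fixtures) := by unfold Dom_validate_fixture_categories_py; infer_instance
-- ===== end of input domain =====

-- B finds duplicates by sorting the categories once and scanning adjacent equal runs, instead of a
-- full count() scan per distinct category (objective: alternative; same messages and results).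

-- ----- helpers shared by both ports (identical lines of the two Pythons: REQUIRED tuple, f-string rendering, category extraction) -----

def pvReqCategories : List String :=
  ["python_repo", "typescript_js_repo", "mixed_docs_code_repo", "multi_repo_workspace", "large_ignored_vendor_repo"]

-- Python repr() of a str, exact on the Dom character set (printable ASCII + tab/newline/CR)
def pvCharEsc (q c : Char) : List Char :=
  if c = '\\' then ['\\', '\\']
  else if c = q then ['\\', q]
  else if c = '\t' then ['\\', 't']
  else if c = '\n' then ['\\', 'n']
  else if c = '\r' then ['\\', 'r']
  else [c]

def pvStrRepr (s : String) : String :=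
  let cs := s.toList
  let q : Char := if cs.contains '\'' && !cs.contains '"' then '"' else '\''
  String.ofList (q :: (cs.flatMap (pvCharEsc q) ++ [q]))

-- str(list_of_str): '[' + ', '.join(repr(x)) + ']'
def pvListRepr (xs : List String) : String :=
  "[" ++ String.intercalate ", " (xs.map pvStrRepr) ++ "]"

-- categories = [str(fixture.get("category", "")) for fixture in fixtures]  (values are str on Dom, so str() is identity)
def pvCategories (fixtures : List (List (String × String))) : List String :=
  fixtures.map (fun f => PySem.Dict.getD (PySem.Dict.mk f) "category" "")

def pvMismatchMsg (actualSorted : List String) : String :=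
  "fixture categories must be exactly " ++
    pvListRepr (PySem.List.sorted (PySem.Set.ofList pvReqCategories) (fun x => x) false) ++
    "; got " ++ pvListRepr actualSorted

def pvDupMsg (duplicates : List String) : String :=
  "duplicate fixture categories: " ++ pvListRepr duplicates

-- ===== PORT A =====
def validate_fixture_categories_py (fixtures : List (List (String × String))) : List String :=
  let categories := pvCategories fixtures
  let expected : PySem.Set String := PySem.Set.ofList pvReqCategories
  let actual : PySem.Set String := PySem.Set.ofList categories
  let errors : List String := []
  let errors :=
    if PySem.Set.equal actual expected then errors
    else errors ++ [pvMismatchMsg (PySem.List.sorted actual (fun x => x) false)]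
  let duplicates :=
    PySem.List.sorted (actual.filter (fun c => decide (1 < categories.count c))) (fun x => x) false
  if duplicates ≠ [] then errors ++ [pvDupMsg duplicates] else errors

-- ===== PORT B =====
-- the while-loop of Source B: walk the sorted list run by run; a run longer than 1 yields its key
def pvDupRuns : List String → List String
  | [] => []
  | x :: xs =>
    let run := xs.takeWhile (fun y => y == x)
    let rest := xs.dropWhile (fun y => y == x)
    if 1 < run.length + 1 then x :: pvDupRuns rest else pvDupRuns rest
termination_by l => l.length
decreasing_by
  all_goals simp only [List.length_cons]
  all_goals exact Nat.lt_succ_of_le (List.dropWhile_sublist (l := xs) (p := fun y => y == x)).length_le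

def validate_fixture_categories_py_alt (fixtures : List (List (String × String))) : List String :=
  let categories := pvCategories fixtures
  let actual : PySem.Set String := PySem.Set.ofList categories
  let errors : List String :=
    if PySem.Set.equal actual (PySem.Set.ofList pvReqCategories) then []
    else [pvMismatchMsg (PySem.List.sorted actual (fun x => x) false)]
  let ordered := PySem.List.sorted categories (fun x => x) false
  let duplicates := pvDupRuns ordered
  if duplicates ≠ [] then errors ++ [pvDupMsg duplicates] else errors

-- ===== PRECONDITION & SPEC =====
def Spec_validate_fixture_categories_py (fixtures : List (List (String × String))) (out : List String) : Prop := out = validate_fixture_categories_py_alt fixtures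
instance (fixtures : List (List (String × String))) (out : List String) : Decidable (Spec_validate_fixture_categories_py fixtures out) := by unfold Spec_validate_fixture_categories_py; infer_instance

-- ===== CLAIM (what is proved, stated in full; the proofs are below) =====
def Claim_equal_validate_fixture_categories_py : Prop := ∀ (fixtures : List (List (String × String))), Dom_validate_fixture_categories_py fixtures → Spec_validate_fixture_categories_py fixtures (validate_fixture_categories_py fixtures)

-- ===== LEMMAS AND PROOFS =====

-- in a ≤-sorted list, everything the dropWhile (== x) keeps is strictly above x
lemma pvDropWhile_lt (x : String) : ∀ (xs : List String), xs.Pairwise (· ≤ ·) →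
    (∀ y ∈ xs, x ≤ y) → ∀ z ∈ xs.dropWhile (fun y => y == x), x < z := by
  intro xs
  induction xs with
  | nil => simp
  | cons y t ih =>
    intro h hle z hz
    rw [List.dropWhile_cons] at hz
    by_cases hy : (y == x) = true
    · rw [if_pos hy] at hz
      exact ih (List.pairwise_cons.mp h).2 (fun a ha => hle a (List.mem_cons_of_mem _ ha)) z hz
    · rw [if_neg hy] at hz
      have hne : y ≠ x := fun e => hy (by simp [e])
      have hxy : x < y := lt_of_le_of_ne (hle y (List.mem_cons_self)) (Ne.symm hne)
      rcases List.mem_cons.mp hz with rfl | hz'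
      · exact hxy
      · exact lt_of_lt_of_le hxy ((List.pairwise_cons.mp h).1 z hz')

-- membership in pvDupRuns of a sorted list = multiplicity above 1
lemma pvDupRuns_count : ∀ (l : List String), l.Pairwise (· ≤ ·) →
    ∀ x, (x ∈ pvDupRuns l ↔ 1 < l.count x) := by
  intro l
  fun_induction pvDupRuns l with
  | case1 => simp
  | case2 x xs run rest hcond ih =>
    intro h c
    obtain ⟨hle, hxs⟩ := List.pairwise_cons.mp h
    have hsplit : run ++ rest = xs := List.takeWhile_append_dropWhile
    have hrun_eq : ∀ y ∈ run, y = x := fun y hy => by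
      simpa using List.mem_takeWhile_imp (l := xs) hy
    have hrest_pw : rest.Pairwise (· ≤ ·) := hxs.sublist (List.dropWhile_sublist _)
    have hlt : ∀ z ∈ rest, x < z := pvDropWhile_lt x xs hxs hle
    have hx_rest : List.count x rest = 0 :=
      List.count_eq_zero.mpr (fun hmem => lt_irrefl x (hlt x hmem))
    have hrun_cnt : List.count x run = run.length :=
      List.count_eq_length.mpr (fun b hb => (hrun_eq b hb).symm)
    have hcount : ∀ a : String, List.count a (x :: xs) = List.count a (x :: (run ++ rest)) :=
      fun a => by rw [hsplit]
    by_cases hc : c = x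
    · rw [hc, hcount x, List.count_cons_self, List.count_append, hrun_cnt, hx_rest]
      constructor
      · intro _; omega
      · intro _; exact List.mem_cons_self
    · have hc_run : List.count c run = 0 :=
        List.count_eq_zero.mpr (fun hmem => hc (hrun_eq c hmem))
      rw [hcount c, List.count_cons_of_ne (fun e => hc e.symm), List.count_append, hc_run]
      simp only [List.mem_cons, hc, false_or, Nat.zero_add]
      exact ih hrest_pw c
  | case3 x xs run rest hcond ih =>
    intro h c
    obtain ⟨hle, hxs⟩ := List.pairwise_cons.mp h
    have hrun : run = [] := List.eq_nil_of_length_eq_zero (by omega)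
    have hsplit : run ++ rest = xs := List.takeWhile_append_dropWhile
    have hxs_eq : xs = rest := by rw [← hsplit, hrun, List.nil_append]
    have hrest_pw : rest.Pairwise (· ≤ ·) := hxs.sublist (List.dropWhile_sublist _)
    have hlt : ∀ z ∈ rest, x < z := pvDropWhile_lt x xs hxs hle
    have hx_rest : List.count x rest = 0 :=
      List.count_eq_zero.mpr (fun hmem => lt_irrefl x (hlt x hmem))
    by_cases hc : c = x
    · rw [hc]
      constructor
      · intro hmem
        have h2 := (ih hrest_pw x).mp hmem
        omega
      · intro hgt
        rw [hxs_eq, List.count_cons_self, hx_rest] at hgt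
        exact absurd hgt (by omega)
    · rw [hxs_eq, List.count_cons_of_ne (fun e => hc e.symm)]
      exact ih hrest_pw c

-- pvDupRuns of a sorted list is strictly increasing
lemma pvDupRuns_pairwise : ∀ (l : List String), l.Pairwise (· ≤ ·) →
    (pvDupRuns l).Pairwise (· < ·) := by
  intro l
  fun_induction pvDupRuns l with
  | case1 => simp
  | case2 x xs run rest hcond ih =>
    intro h
    obtain ⟨hle, hxs⟩ := List.pairwise_cons.mp h
    have hrest_pw : rest.Pairwise (· ≤ ·) := hxs.sublist (List.dropWhile_sublist _)
    have hlt : ∀ z ∈ rest, x < z := pvDropWhile_lt x xs hxs hle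
    refine List.pairwise_cons.mpr ⟨fun z hz => ?_, ih hrest_pw⟩
    have hcz := (pvDupRuns_count rest hrest_pw z).mp hz
    have hz_mem : z ∈ rest := List.count_pos_iff.mp (by omega)
    exact hlt z hz_mem
  | case3 x xs run rest hcond ih =>
    intro h
    obtain ⟨hle, hxs⟩ := List.pairwise_cons.mp h
    exact ih (hxs.sublist (List.dropWhile_sublist _))

-- the duplicates of A (sorted filter over the set) equal the duplicates of B (runs of the sorted list)
lemma pvDup_eq (cats : List String) :
    PySem.List.sorted ((PySem.Set.ofList cats).filter (fun c => decide (1 < cats.count c))) (fun x => x) false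
      = pvDupRuns (PySem.List.sorted cats (fun x => x) false) := by
  have hs : (PySem.List.sorted cats (fun x => x) false).Pairwise (· ≤ ·) := by
    simpa using PySem.List.sorted_pairwise (xs := cats) (key := fun x => x)
  have hperm : (PySem.List.sorted cats (fun x => x) false).Perm cats :=
    PySem.List.sorted_perm cats (fun x => x) false
  have hpw := pvDupRuns_pairwise _ hs
  apply PySem.List.sorted_eq_of_perm_of_pairwise_lt
  · refine (List.perm_ext_iff_of_nodup (hpw.imp (fun h => ne_of_lt h))
      ((PySem.Set.nodup_ofList (xs := cats)).filter _)).mpr ?_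
    intro a
    rw [pvDupRuns_count _ hs a, hperm.count_eq, List.mem_filter, PySem.Set.mem_ofList]
    constructor
    · intro hc
      exact ⟨List.count_pos_iff.mp (by omega), by simpa using hc⟩
    · rintro ⟨_, hc⟩
      simpa using hc
  · exact hpw

-- ===== VERDICT (by name: the statement is the Claim_ definition above) =====
theorem validate_fixture_categories_py_spec : Claim_equal_validate_fixture_categories_py := by
  intro fixtures _
  unfold Spec_validate_fixture_categories_py
  unfold validate_fixture_categories_py validate_fixture_categories_py_alt
  simp only [List.nil_append, pvDup_eq]
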